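-- pv_equiv track=rewrite | github.com/mihaelaapetroaie/wifilog | wifi.py | nicer
-- ===== SOURCE A (Python) =====
-- def is_start(line):
-- 	return line.strip()[:4]=="Cell"
--
-- def nicer(lines):
-- 	index=0
-- 	devices=[]
-- 	for i,line in enumerate(lines):
-- 		if is_start(line):
-- 			if i>=1:
-- 				devices.append(lines[i-index:i])
-- 			index=1
-- 		else:
-- 			index=index+1
-- 	devices.append(lines[len(lines)-index:])
-- 	return devices
-- ===== SOURCE B (Python) =====
-- def is_start(line):
-- 	return line.strip()[:4]=="Cell"
--
-- def nicer(lines):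
-- 	starts = [i for i in range(1, len(lines)) if is_start(lines[i])]
-- 	bounds = [0] + starts + [len(lines)]
-- 	return [lines[a:b] for a, b in zip(bounds, bounds[1:])]
-- ===== Notes on version B (the rewrite author's own statement) =====
-- stated objective: alternative
-- what changed: Replaces A's running group-length counter threaded through one stateful loop with a two-pass boundary-table decomposition: first collect the indices of 'Cell' start lines (i >= 1), then slice the input between consecutive boundaries [0]+starts+[len].
import Mathlib
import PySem

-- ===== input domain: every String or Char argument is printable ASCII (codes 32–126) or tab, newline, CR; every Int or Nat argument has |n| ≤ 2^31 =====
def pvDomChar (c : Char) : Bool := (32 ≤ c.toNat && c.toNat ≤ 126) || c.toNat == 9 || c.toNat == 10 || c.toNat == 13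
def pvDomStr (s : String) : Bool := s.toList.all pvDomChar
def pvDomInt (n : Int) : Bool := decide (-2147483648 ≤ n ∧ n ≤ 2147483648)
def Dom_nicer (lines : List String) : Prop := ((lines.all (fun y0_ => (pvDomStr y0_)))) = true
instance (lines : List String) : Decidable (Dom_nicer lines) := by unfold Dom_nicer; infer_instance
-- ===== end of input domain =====

-- B replaces A's running-counter loop with a boundary-index table plus a slicing pass (alternative decomposition, same cost).

-- ===== PORT A =====
-- is_start(line): line.strip()[:4] == "Cell"
def isStart (line : String) : Bool :=
  PySem.Chars.slice (PySem.Chars.strip line.toList) none (some 4) == ['C', 'e', 'l', 'l']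

-- the body of A's 'for i,line in enumerate(lines)' loop; state = (index, devices)
def nicerStep (lines : List String) (st : Int × List (List String)) (p : Int × String) :
    Int × List (List String) :=
  if isStart p.2 then
    (1, if p.1 ≥ 1 then st.2 ++ [PySem.List.slice lines (some (p.1 - st.1)) (some p.1)] else st.2)
  else (st.1 + 1, st.2)

def nicer (lines : List String) : List (List String) :=
  let r := (PySem.List.enumerate lines 0).foldl (nicerStep lines) (0, [])
  r.2 ++ [PySem.List.slice lines (some ((lines.length : Int) - r.1)) none]

-- ===== PORT B =====
def nicer_alt (lines : List String) : List (List String) :=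
  let n : Int := lines.length
  -- i ranges over range(1, len(lines)), so lines[i] is always in range
  let starts := (PySem.List.pyRange 1 n 1).filter (fun i => isStart (PySem.List.pyGetD lines i ""))
  let bounds := [0] ++ starts ++ [n]
  (bounds.zip (PySem.List.slice bounds (some 1) none)).map
    (fun p => PySem.List.slice lines (some p.1) (some p.2))

-- ===== PRECONDITION & SPEC =====
def Spec_nicer (lines : List String) (out : List (List String)) : Prop := out = nicer_alt lines
instance (lines : List String) (out : List (List String)) : Decidable (Spec_nicer lines out) := by unfold Spec_nicer; infer_instance

-- ===== CLAIM (what is proved, stated in full; the proofs are below) =====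
def Claim_equal_nicer : Prop := ∀ (lines : List String), Dom_nicer lines → Spec_nicer lines (nicer lines)

-- ===== LEMMAS AND PROOFS =====

-- common characterisation: the groups of 'lines' with open boundary b, scanning the enumerated suffix
def splitFrom (lines : List String) (b : Int) : List (Int × String) → List (List String)
  | [] => [PySem.List.slice lines (some b) none]
  | (i, line) :: rest =>
      if isStart line then PySem.List.slice lines (some b) (some i) :: splitFrom lines i rest
      else splitFrom lines b rest

-- B's slicing pass over a boundary list
def adjSlices (lines : List String) (bs : List Int) : List (List String) :=
  (bs.zip bs.tail).map (fun p => PySem.List.slice lines (some p.1) (some p.2))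

lemma slice_from_eq_to_len (xs : List String) (b : Nat) :
    PySem.List.slice xs (some (b : Int)) none
      = PySem.List.slice xs (some (b : Int)) (some (xs.length : Int)) := by
  rw [PySem.List.slice_from_natCast, PySem.List.slice_natCast]
  exact (List.take_of_length_le (by simp)).symm

lemma nicer_go (lines : List String) :
    ∀ (xs : List String) (k b : Nat) (devices : List (List String)),
      1 ≤ k → b ≤ k → k + xs.length = lines.length →
      ((PySem.List.enumerate xs (k : Int)).foldl (nicerStep lines)
          (((k : Int) - (b : Int)), devices)).2
        ++ [PySem.List.slice lines (some ((lines.length : Int) -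
              ((PySem.List.enumerate xs (k : Int)).foldl (nicerStep lines)
                (((k : Int) - (b : Int)), devices)).1)) none]
        = devices ++ splitFrom lines (b : Int) (PySem.List.enumerate xs (k : Int)) := by
  intro xs
  induction xs with
  | nil =>
    intro k b devices hk hbk hlen
    simp only [List.length_nil] at hlen
    simp only [PySem.List.enumerate_nil, List.foldl_nil, splitFrom]
    have hb : ((lines.length : Int) - ((k : Int) - (b : Int))) = (b : Int) := by
      have : k = lines.length := by omega
      subst this; omega
    rw [hb]
  | cons x xs ih =>
    intro k b devices hk hbk hlen
    simp only [List.length_cons] at hlen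
    rw [PySem.List.enumerate_cons]
    simp only [List.foldl_cons, splitFrom]
    by_cases hs : isStart x
    · simp only [nicerStep, hs, if_pos]
      have hge : ((k : Int) ≥ 1) := by exact_mod_cast hk
      rw [if_pos hge]
      have hb : ((k : Int) - ((k : Int) - (b : Int))) = (b : Int) := by omega
      rw [hb]
      have h1 : ((k : Int) + 1) = (((k + 1 : Nat) : Int)) := by push_cast; ring
      have h2 : ((1 : Int)) = (((k + 1 : Nat) : Int)) - ((k : Nat) : Int) := by push_cast; ring
      rw [h1, h2]
      rw [ih (k + 1) k (devices ++ [PySem.List.slice lines (some (b : Int)) (some (k : Int))])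
            (by omega) (by omega) (by omega)]
      simp
    · simp only [nicerStep, hs, Bool.false_eq_true, if_false]
      have h1 : ((k : Int) + 1) = (((k + 1 : Nat) : Int)) := by push_cast; ring
      have h2 : ((k : Int) - (b : Int) + 1) = (((k + 1 : Nat) : Int)) - ((b : Nat) : Int) := by
        push_cast; ring
      rw [h1, h2]
      exact ih (k + 1) b devices (by omega) (by omega) (by omega)

lemma zip_slice_one (lines : List String) (bs : List Int) :
    (bs.zip (PySem.List.slice bs (some 1) none)).map
      (fun p => PySem.List.slice lines (some p.1) (some p.2)) = adjSlices lines bs := by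
  rw [PySem.List.slice_from_one]; rfl

lemma splitFrom_eq_adj (lines : List String) :
    ∀ (xs : List String) (k b : Nat),
      b ≤ k → k + xs.length = lines.length → xs = lines.drop k →
      splitFrom lines (b : Int) (PySem.List.enumerate xs (k : Int))
        = adjSlices lines ((b : Int) ::
            ((PySem.List.pyRange (k : Int) (lines.length : Int) 1).filter
              (fun i => isStart (PySem.List.pyGetD lines i ""))) ++ [(lines.length : Int)]) := by
  intro xs
  induction xs with
  | nil =>
    intro k b hbk hlen hdrop
    simp only [List.length_nil] at hlen
    have hk : (k : Int) = (lines.length : Int) := by exact_mod_cast by omega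
    rw [hk, PySem.List.pyRange_one_eq_nil (le_refl _)]
    simp only [PySem.List.enumerate_nil, splitFrom]
    rw [slice_from_eq_to_len]
    simp [adjSlices]
  | cons x xs ih =>
    intro k b hbk hlen hdrop
    simp only [List.length_cons] at hlen
    have hkn : (k : Int) < (lines.length : Int) := by exact_mod_cast by omega
    rw [PySem.List.pyRange_one_cons hkn]
    have hx : PySem.List.pyGetD lines (k : Int) "" = x := by
      rw [PySem.List.pyGetD_natCast]
      have hk0 : lines[k]? = some x := by
        have h := congrArg (fun l => l[0]?) hdrop
        simpa [List.getElem?_drop] using h.symm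
      simp [List.getD, hk0]
    have hdrop' : xs = lines.drop (k + 1) := by
      have h := congrArg (List.drop 1) hdrop
      simpa [List.drop_drop, Nat.add_comm] using h
    rw [PySem.List.enumerate_cons]
    simp only [splitFrom, List.filter_cons, hx]
    by_cases hs : isStart x
    · rw [if_pos hs]
      simp only [hs, if_true]
      have h1 : ((k : Int) + 1) = (((k + 1 : Nat) : Int)) := by push_cast; ring
      rw [h1, ih (k + 1) k (by omega) (by omega) hdrop']
      simp [adjSlices]
    · rw [if_neg hs]
      simp only [hs, Bool.false_eq_true, if_false]
      have h1 : ((k : Int) + 1) = (((k + 1 : Nat) : Int)) := by push_cast; ring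
      rw [h1, ih (k + 1) b (by omega) (by omega) hdrop']

-- ===== VERDICT (by name: the statement is the Claim_ definition above) =====
theorem nicer_spec : Claim_equal_nicer := by
  intro lines _
  unfold Spec_nicer
  cases lines with
  | nil => decide
  | cons x rest =>
    have hgo := nicer_go (x :: rest) rest 1 0 []
      (by omega) (by omega) (by simp only [List.length_cons]; omega)
    have hadj := splitFrom_eq_adj (x :: rest) rest 1 0
      (by omega) (by simp only [List.length_cons]; omega) (by simp)
    simp only [Nat.cast_one, Nat.cast_zero, sub_zero, List.nil_append] at hgo hadj
    have hstep : nicerStep (x :: rest) (0, []) (0, x) = (1, []) := by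
      by_cases hs : isStart x <;> simp [nicerStep, hs]
    have hA : nicer (x :: rest)
        = splitFrom (x :: rest) (0 : Int) (PySem.List.enumerate rest (1 : Int)) := by
    -- zeta-expand nicer's let
      show ((PySem.List.enumerate (x :: rest) 0).foldl (nicerStep (x :: rest)) (0, [])).2
          ++ [PySem.List.slice (x :: rest)
                (some ((((x :: rest).length : Nat) : Int) -
                  ((PySem.List.enumerate (x :: rest) 0).foldl (nicerStep (x :: rest)) (0, [])).1))
                none]
          = splitFrom (x :: rest) (0 : Int) (PySem.List.enumerate rest (1 : Int))
      rw [PySem.List.enumerate_cons]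
      simp only [List.foldl_cons, hstep, zero_add]
      exact hgo
    have hB : nicer_alt (x :: rest)
        = splitFrom (x :: rest) (0 : Int) (PySem.List.enumerate rest (1 : Int)) := by
      simp only [nicer_alt, zip_slice_one, List.cons_append, List.nil_append]
      exact hadj.symm
    rw [hA, hB]
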